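-- pv_equiv track=rewrite | github.com/TerryTong-Git/ToolProj | src/exps_performance/problems/__init__.py | _extract_json_span
-- ===== SOURCE A (Python) =====
-- def _extract_json_span(text: str) -> str:
--     """Keep content between the first opening and last closing brace/bracket."""
--     starts = [pos for pos in (text.find("{"), text.find("[")) if pos != -1]
--     ends = [pos for pos in (text.rfind("}"), text.rfind("]")) if pos != -1]
--     if not starts or not ends:
--         return text
--     start = min(starts)
--     end = max(ends)
--     return text[start : end + 1] if start < end else text
-- ===== SOURCE B (Python) =====
-- def _extract_json_span(text: str) -> str:
--     """Keep content between the first opening and last closing brace/bracket."""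
--     # Trim from both ends: pop chars until an opener leads and a closer trails;
--     # an empty remainder means no valid span, so the original text is returned.
--     rev = list(reversed(text))
--     while rev and rev[-1] not in "{[":
--         rev.pop()
--     rev.reverse()
--     while rev and rev[-1] not in "}]":
--         rev.pop()
--     return "".join(rev) if rev else text
-- ===== Notes on version B (the rewrite author's own statement) =====
-- stated objective: alternative
-- what changed: Instead of computing first-open/last-close indices via four find/rfind scans plus min/max and slicing, B trims the text from both ends (popping characters until an opener leads and a closer trails) and falls back to the original text when the remainder is empty.
import Mathlib
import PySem

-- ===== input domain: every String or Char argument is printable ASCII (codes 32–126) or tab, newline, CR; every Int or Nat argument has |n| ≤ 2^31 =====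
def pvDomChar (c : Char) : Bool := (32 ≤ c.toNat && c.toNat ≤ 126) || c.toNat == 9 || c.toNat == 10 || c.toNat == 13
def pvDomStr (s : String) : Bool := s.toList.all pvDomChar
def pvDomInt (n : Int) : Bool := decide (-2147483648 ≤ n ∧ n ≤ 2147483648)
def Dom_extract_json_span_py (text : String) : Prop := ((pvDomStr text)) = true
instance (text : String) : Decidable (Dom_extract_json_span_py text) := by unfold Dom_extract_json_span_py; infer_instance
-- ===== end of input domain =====

-- B trims the text from both ends (pop until an opener leads / a closer trails) and
-- falls back to the original text when the remainder is empty (objective: alternative).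

-- ===== PORT A =====
def extract_json_span_py (text : String) : String :=
  let l := text.toList
  let starts := ([PySem.Chars.find l ['{'], PySem.Chars.find l ['[']]).filter (fun p => p != -1)
  let ends := ([PySem.Chars.rfind l ['}'], PySem.Chars.rfind l [']']]).filter (fun p => p != -1)
  if starts.isEmpty || ends.isEmpty then text
  else
    let start := (PySem.List.min? starts (fun x => x)).getD 0
    let stop := (PySem.List.max? ends (fun x => x)).getD 0
    if start < stop then String.ofList (PySem.Chars.slice l (some start) (some (stop + 1))) else text

-- ===== PORT B =====
-- 'while rev and rev[-1] not in S: rev.pop()' of Source B: rev holds the remaining text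
-- reversed, so popping rev's last element is dropping the head of the unreversed list.
def stripUntil (p : Char → Bool) : List Char → List Char
  | [] => []
  | h :: t => if p h then h :: t else stripUntil p t

def extract_json_span_py_alt (text : String) : String :=
  let l := text.toList
  -- loop 1: rev = reversed(text); popping its last = dropping the head of l
  let s1 := stripUntil (fun c => c == '{' || c == '[') l
  -- rev.reverse(); loop 2 pops the last = drops the head of the reversed remainder
  let s2 := stripUntil (fun c => c == '}' || c == ']') s1.reverse
  if s2.isEmpty then text else String.ofList s2.reverse

-- ===== PRECONDITION & SPEC =====
def Spec_extract_json_span_py (text : String) (out : String) : Prop := out = extract_json_span_py_alt text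
instance (text : String) (out : String) : Decidable (Spec_extract_json_span_py text out) := by unfold Spec_extract_json_span_py; infer_instance

-- ===== CLAIM (what is proved, stated in full; the proofs are below) =====
def Claim_equal_extract_json_span_py : Prop := ∀ (text : String), Dom_extract_json_span_py text → Spec_extract_json_span_py text (extract_json_span_py text)

-- ===== LEMMAS AND PROOFS =====
theorem single_isPrefixOf_cons (c h : Char) (t : List Char) :
    [c].isPrefixOf (h :: t) = (c == h) := by
  show (c == h && List.isPrefixOf [] t) = (c == h); simp

theorem single_isPrefixOf_nil (c : Char) : [c].isPrefixOf ([] : List Char) = false := rfl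

def firstP? (p : Char → Bool) : List Char → Option Nat
  | [] => none
  | h :: t => if p h then some 0 else (· + 1) <$> firstP? p t

theorem find_go_single (c : Char) :
    ∀ (l : List Char) (k : Nat),
      PySem.Chars.find.go [c] l k =
        match firstP? (fun ch => ch == c) l with
        | some j => ((k + j : Nat) : Int)
        | none => -1 := by
  intro l
  induction l with
  | nil => intro k; simp [PySem.Chars.find.go, firstP?]
  | cons h t ih =>
      intro k
      rw [PySem.Chars.find.go, single_isPrefixOf_cons]
      by_cases hc : h = c
      · subst hc; simp [firstP?]
      · have hne : (h == c) = false := by simp [hc]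
        have hne' : (c == h) = false := by simp [Ne.symm hc]
        rw [hne']
        simp only [Bool.false_eq_true, if_false]
        rw [ih (k + 1)]
        simp only [firstP?, hne, Bool.false_eq_true, if_false]
        cases hf : firstP? (fun ch => ch == c) t with
        | none => simp [hf]
        | some j => simp [hf]; push_cast; ring

def lastP? (p : Char → Bool) : List Char → Option Nat
  | [] => none
  | h :: t =>
      match lastP? p t with
      | some j => some (j + 1)
      | none => if p h then some 0 else none

theorem lastP?_append_singleton (p : Char → Bool) (xs : List Char) (x : Char) :
    lastP? p (xs ++ [x]) = if p x then some xs.length else lastP? p xs := by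
  induction xs with
  | nil =>
      simp only [List.nil_append, lastP?, List.length_nil]
  | cons h t ih =>
      simp only [List.cons_append, lastP?, ih]
      by_cases hx : p x = true
      · simp [hx]
      · simp only [Bool.not_eq_true] at hx
        simp [hx]

theorem rfind_go_single (l : List Char) (c : Char) :
    ∀ (j : Nat),
      PySem.Chars.rfind.go l [c] j =
        match lastP? (fun ch => ch == c) (l.take (j + 1)) with
        | some i => (i : Int)
        | none => -1 := by
  intro j
  induction j with
  | zero =>
      rw [PySem.Chars.rfind.go]
      cases l with
      | nil => simp [single_isPrefixOf_nil, lastP?]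
      | cons h t =>
          rw [List.take_succ_cons, List.take_zero, single_isPrefixOf_cons]
          by_cases hc : c = h
          · simp [hc, lastP?]
          · have : (c == h) = false := by simp [hc]
            simp [this, lastP?, Ne.symm hc]
  | succ j ih =>
      rw [PySem.Chars.rfind.go, ih]
      by_cases hlt : j + 1 < l.length
      · have htake : l.take (j + 2) = l.take (j + 1) ++ [l[j+1]] := by
          rw [List.take_succ, List.getElem?_eq_getElem hlt]; rfl
        have hdrop : [c].isPrefixOf (l.drop (j + 1)) = (c == l[j+1]) := by
          have : l.drop (j + 1) = l[j+1] :: l.drop (j + 2) := by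
            rw [List.drop_eq_getElem_cons hlt]
          rw [this, single_isPrefixOf_cons]
        rw [htake, hdrop, lastP?_append_singleton]
        have hlen : (l.take (j + 1)).length = j + 1 := by
          simp; omega
        by_cases hc : c = l[j+1]
        · simp [hc, hlen]
        · have h1 : (c == l[j+1]) = false := by simp [hc]
          have h2 : (l[j+1] == c) = false := by simp [Ne.symm hc]
          simp [h1, h2]
      · have hdrop : l.drop (j + 1) = [] := by
          rw [List.drop_eq_nil_iff]; omega
        have htake : l.take (j + 2) = l.take (j + 1) := by
          rw [List.take_of_length_le (by omega), List.take_of_length_le (by omega)]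
        rw [hdrop, htake, single_isPrefixOf_nil]
        simp

theorem rfind_single (l : List Char) (c : Char) :
    PySem.Chars.rfind l [c] =
      match lastP? (fun ch => ch == c) l with
      | some i => (i : Int)
      | none => -1 := by
  rw [PySem.Chars.rfind, rfind_go_single]
  rw [List.take_of_length_le (by omega)]

def minOpt : Option Nat → Option Nat → Option Nat
  | none, y => y
  | some a, none => some a
  | some a, some b => some (min a b)

def maxOpt : Option Nat → Option Nat → Option Nat
  | none, y => y
  | some a, none => some a
  | some a, some b => some (max a b)

theorem firstP?_or (a b : Char → Bool) (l : List Char) :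
    minOpt (firstP? a l) (firstP? b l) = firstP? (fun ch => a ch || b ch) l := by
  induction l with
  | nil => rfl
  | cons h t ih =>
      simp only [firstP?]
      by_cases ha : a h = true
      · simp only [ha, if_true, Bool.true_or, if_true]
        cases hb : firstP? b t <;> by_cases hbh : b h = true <;>
          simp [hbh, minOpt]
      · simp only [ha]
        by_cases hbh : b h = true
        · simp only [hbh, Bool.false_eq_true, if_false, if_true, Bool.or_true]
          cases hf : firstP? a t <;> simp [minOpt]
        · simp only [hbh, Bool.false_eq_true, if_false, Bool.or_self, ← ih]
          cases hf : firstP? a t <;> cases hg : firstP? b t <;> simp [minOpt]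

theorem lastP?_or (a b : Char → Bool) (l : List Char) :
    maxOpt (lastP? a l) (lastP? b l) = lastP? (fun ch => a ch || b ch) l := by
  induction l with
  | nil => rfl
  | cons h t ih =>
      simp only [lastP?, ← ih]
      cases hf : lastP? a t <;> cases hg : lastP? b t <;>
        by_cases ha : a h = true <;> by_cases hb : b h = true <;>
          simp [maxOpt, ha, hb]

def opt2int : Option Nat → Int
  | some j => (j : Int)
  | none => -1

theorem find_single (l : List Char) (c : Char) :
    PySem.Chars.find l [c] = opt2int (firstP? (fun ch => ch == c) l) := by
  rw [PySem.Chars.find, find_go_single]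
  cases h : firstP? (fun ch => ch == c) l <;> simp [opt2int]

theorem rfind_single' (l : List Char) (c : Char) :
    PySem.Chars.rfind l [c] = opt2int (lastP? (fun ch => ch == c) l) := by
  rw [rfind_single]
  cases h : lastP? (fun ch => ch == c) l <;> simp [opt2int]

theorem natCast_bne_neg_one (a : Nat) : (((a : Int)) != -1) = true := by
  simp only [bne_iff_ne, ne_eq]
  omega

theorem filter_pair_isEmpty (F1 F2 : Option Nat) :
    (([opt2int F1, opt2int F2]).filter (fun p => p != -1)).isEmpty =
      (minOpt F1 F2).isNone := by
  cases F1 <;> cases F2 <;>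
    simp [opt2int, minOpt, List.filter, natCast_bne_neg_one]

theorem min_getD (F1 F2 : Option Nat) (m : Nat) (h : minOpt F1 F2 = some m) :
    (PySem.List.min? (([opt2int F1, opt2int F2]).filter (fun p => p != -1))
        (fun x => x)).getD 0 = (m : Int) := by
  cases F1 with
  | none =>
      cases F2 with
      | none => simp [minOpt] at h
      | some b =>
          simp only [minOpt] at h
          injection h with h; subst h
          simp [opt2int, List.filter, natCast_bne_neg_one, PySem.List.min?_id_cons]
  | some a =>
      cases F2 with
      | none =>
          simp only [minOpt] at h
          injection h with h; subst h
          simp [opt2int, List.filter, natCast_bne_neg_one, PySem.List.min?_id_cons]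
      | some b =>
          simp only [minOpt] at h
          injection h with h; subst h
          simp [opt2int, List.filter, natCast_bne_neg_one, PySem.List.min?_id_cons,
            Nat.cast_min]

theorem max_getD (F1 F2 : Option Nat) (m : Nat) (h : maxOpt F1 F2 = some m) :
    (PySem.List.max? (([opt2int F1, opt2int F2]).filter (fun p => p != -1))
        (fun x => x)).getD 0 = (m : Int) := by
  cases F1 with
  | none =>
      cases F2 with
      | none => simp [maxOpt] at h
      | some b =>
          simp only [maxOpt] at h
          injection h with h; subst h
          simp [opt2int, List.filter, natCast_bne_neg_one, PySem.List.max?_id_cons]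
  | some a =>
      cases F2 with
      | none =>
          simp only [maxOpt] at h
          injection h with h; subst h
          simp [opt2int, List.filter, natCast_bne_neg_one, PySem.List.max?_id_cons]
      | some b =>
          simp only [maxOpt] at h
          injection h with h; subst h
          simp [opt2int, List.filter, natCast_bne_neg_one, PySem.List.max?_id_cons,
            Nat.cast_max]

theorem minOpt_isNone_eq (x y : Option Nat) : (minOpt x y).isNone = (maxOpt x y).isNone := by
  cases x <;> cases y <;> rfl

-- ===== B-side lemmas =====
theorem stripUntil_eq (p : Char → Bool) (l : List Char) :
    stripUntil p l = match firstP? p l with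
    | some j => l.drop j
    | none => [] := by
  induction l with
  | nil => rfl
  | cons h t ih =>
      simp only [stripUntil, firstP?]
      by_cases hp : p h = true
      · simp [hp]
      · simp only [Bool.not_eq_true] at hp
        simp only [hp, Bool.false_eq_true, if_false, ih]
        cases hf : firstP? p t <;> simp

theorem firstP?_lt_length (p : Char → Bool) :
    ∀ (l : List Char) (j : Nat), firstP? p l = some j → j < l.length ∧ p (l.getD j ' ') = true := by
  intro l
  induction l with
  | nil => intro j h; simp [firstP?] at h
  | cons h t ih =>
      intro j hj
      simp only [firstP?] at hj
      by_cases hp : p h = true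
      · simp only [hp, if_true, Option.some.injEq] at hj
        subst hj; simpa using hp
      · simp only [Bool.not_eq_true] at hp
        simp only [hp, Bool.false_eq_true, if_false, Option.map_eq_map, Option.map_eq_some_iff] at hj
        obtain ⟨j', hj', rfl⟩ := hj
        obtain ⟨h1, h2⟩ := ih j' hj'
        exact ⟨by simpa using Nat.succ_lt_succ h1, by simpa using h2⟩

theorem lastP?_eq_firstP?_reverse (p : Char → Bool) (l : List Char) :
    lastP? p l = (firstP? p l.reverse).map (fun i => l.length - 1 - i) := by
  induction l using List.reverseRecOn with
  | nil => rfl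
  | append_singleton xs x ih =>
      rw [lastP?_append_singleton, List.reverse_append]
      simp only [List.reverse_cons, List.reverse_nil, List.nil_append, List.cons_append,
        List.singleton_append, firstP?]
      by_cases hx : p x = true
      · simp [hx]
      · simp only [Bool.not_eq_true] at hx
        simp only [hx, Bool.false_eq_true, if_false, ih]
        cases hf : firstP? p xs.reverse with
        | none => simp
        | some i =>
            have hi : i < xs.length := by
              have := (firstP?_lt_length p xs.reverse i hf).1
              simpa using this
            simp [List.length_append]
            omega


theorem firstP?_take (p : Char → Bool) :
    ∀ (l : List Char) (m : Nat),
      firstP? p (l.take m) = match firstP? p l with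
      | some i => if i < m then some i else none
      | none => none := by
  intro l
  induction l with
  | nil => intro m; simp [firstP?]
  | cons h t ih =>
      intro m
      cases m with
      | zero =>
          simp only [List.take_zero, firstP?]
          cases hf : firstP? p t <;> by_cases hp : p h = true <;> simp [hp, hf]
      | succ m =>
          rw [List.take_succ_cons]
          simp only [firstP?, ih]
          by_cases hp : p h = true
          · simp [hp]
          · simp only [Bool.not_eq_true] at hp
            simp only [hp, Bool.false_eq_true, if_false]
            cases hf : firstP? p t with
            | none => simp
            | some i =>
                by_cases hi : i < m
                · simp [hi, Nat.succ_lt_succ hi]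
                · have : ¬ (i + 1 < m + 1) := by omega
                  simp [hi, this]

theorem open_close_disjoint (c : Char)
    (h1 : (c == '{' || c == '[') = true) (h2 : (c == '}' || c == ']') = true) : False := by
  rcases Bool.or_eq_true_iff.mp h1 with h | h <;> rcases Bool.or_eq_true_iff.mp h2 with g | g <;>
    · rw [eq_of_beq h] at g; simp at g

theorem main_eq (text : String) :
    extract_json_span_py text = extract_json_span_py_alt text := by
  unfold extract_json_span_py extract_json_span_py_alt
  dsimp only
  rw [find_single, find_single, rfind_single', rfind_single']
  cases hF : firstP? (fun ch => ch == '{' || ch == '[') text.toList with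
  | none =>
      have hs1 : stripUntil (fun c => c == '{' || c == '[') text.toList = [] := by
        rw [stripUntil_eq, hF]
      have hmin : minOpt (firstP? (fun ch => ch == '{') text.toList)
          (firstP? (fun ch => ch == '[') text.toList) = none := by
        have := firstP?_or (fun ch => ch == '{') (fun ch => ch == '[') text.toList
        simp only at this
        rw [this, hF]
      simp only [filter_pair_isEmpty, hmin, Option.isNone_none, Bool.true_or, if_true]
      rw [hs1]
      simp [stripUntil]
  | some j =>
      have hs1 : stripUntil (fun c => c == '{' || c == '[') text.toList
          = text.toList.drop j := by
        rw [stripUntil_eq, hF]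
      have hmin : minOpt (firstP? (fun ch => ch == '{') text.toList)
          (firstP? (fun ch => ch == '[') text.toList) = some j := by
        have := firstP?_or (fun ch => ch == '{') (fun ch => ch == '[') text.toList
        simp only at this
        rw [this, hF]
      obtain ⟨hjlen, hjch⟩ := firstP?_lt_length _ _ _ hF
      have hrev : (text.toList.drop j).reverse
          = text.toList.reverse.take (text.toList.length - j) := List.reverse_drop
      cases hL : lastP? (fun ch => ch == '}' || ch == ']') text.toList with
      | none =>
          have hmax : maxOpt (lastP? (fun ch => ch == '}') text.toList)
              (lastP? (fun ch => ch == ']') text.toList) = none := by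
            have := lastP?_or (fun ch => ch == '}') (fun ch => ch == ']') text.toList
            simp only at this
            rw [this, hL]
          have hmax' : minOpt (lastP? (fun ch => ch == '}') text.toList)
              (lastP? (fun ch => ch == ']') text.toList) = none := by
            exact Option.isNone_iff_eq_none.mp (by rw [minOpt_isNone_eq, hmax]; rfl)
          -- no closer anywhere, so none in the trimmed remainder either
          have hFrev : firstP? (fun ch => ch == '}' || ch == ']') text.toList.reverse = none := by
            rw [lastP?_eq_firstP?_reverse] at hL
            cases h : firstP? (fun ch => ch == '}' || ch == ']') text.toList.reverse with
            | none => rfl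
            | some i => rw [h] at hL; simp at hL
          have hs2 : firstP? (fun ch => ch == '}' || ch == ']')
              ((text.toList.drop j).reverse) = none := by
            rw [hrev, firstP?_take, hFrev]
          simp only [filter_pair_isEmpty, hmin, hmax',
            Option.isNone_none, Option.isNone_some, Bool.or_true, if_true]
          rw [hs1, stripUntil_eq, hs2]
          simp
      | some k =>
          have hmax : maxOpt (lastP? (fun ch => ch == '}') text.toList)
              (lastP? (fun ch => ch == ']') text.toList) = some k := by
            have := lastP?_or (fun ch => ch == '}') (fun ch => ch == ']') text.toList
            simp only at this
            rw [this, hL]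
          have hmax' : (minOpt (lastP? (fun ch => ch == '}') text.toList)
              (lastP? (fun ch => ch == ']') text.toList)).isNone = false := by
            rw [minOpt_isNone_eq, hmax]; rfl
          -- decompose hL through the reverse
          have hL' := hL
          rw [lastP?_eq_firstP?_reverse] at hL'
          obtain ⟨i, hFrev, hik⟩ := Option.map_eq_some_iff.mp hL'
          obtain ⟨hilen', hich⟩ := firstP?_lt_length _ _ _ hFrev
          have hilen : i < text.toList.length := by simpa using hilen'
          have hk : k = text.toList.length - 1 - i := hik.symm
          -- the char at j is an opener, the char at k a closer, so j ≠ k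
          have hjk : j ≠ k := by
            intro he
            apply open_close_disjoint (text.toList.getD j ' ') hjch
            have : text.toList.reverse.getD i ' ' = text.toList.getD (text.toList.length - 1 - i) ' ' := by
              rw [List.getD_eq_getElem _ _ hilen', List.getD_eq_getElem _ _ (by omega)]
              simp [List.getElem_reverse]
            rw [he, hk, ← this]
            exact hich
          simp only [filter_pair_isEmpty, hmin, hmax',
            Option.isNone_some, Bool.or_self, if_false]
          rw [min_getD _ _ j hmin, max_getD _ _ k hmax, hs1, stripUntil_eq, hrev, firstP?_take, hFrev]
          by_cases hlt : j < k
          · have hcond : i < text.toList.length - j := by omega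
            simp only [hcond, if_true]
            have hne : ((text.toList.reverse.take (text.toList.length - j)).drop i).isEmpty = false := by
              rw [List.isEmpty_eq_false_iff, ← List.length_pos_iff, List.length_drop,
                List.length_take, List.length_reverse]
              omega
            rw [hne]
            have hjk' : ((j : Int) < (k : Int)) = True := by simp; omega
            simp only [hjk', if_true, Bool.false_eq_true, if_false]
            -- identify the two character lists
            have hcast : (k : Int) + 1 = ((k + 1 : Nat) : Int) := by push_cast; ring
            rw [PySem.Chars.slice_eq_listSlice, hcast, PySem.List.slice_natCast]
            congr 1
            rw [← hrev, List.reverse_drop]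
            simp only [List.reverse_reverse, List.length_reverse, List.length_drop]
            congr 1
            omega
          · -- k < j: no closer survives the left trim; both return text
            have hkj : k < j := by omega
            have hcond : ¬ (i < text.toList.length - j) := by omega
            simp only [hcond, if_false]
            have hjk' : ¬ ((j : Int) < (k : Int)) := by simp; omega
            simp [hjk']

-- ===== VERDICT (by name: the statement is the Claim_ definition above) =====
theorem extract_json_span_py_spec : Claim_equal_extract_json_span_py := by
  intro text _
  unfold Spec_extract_json_span_py
  exact main_eq text
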